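-- pv_equiv track=rewrite | github.com/nownabe/competitive_programming | AtCoder/ABC042C.py | solve
-- ===== SOURCE A (Python) =====
-- def solve(N, K, D):
--     nums = [i for i in range(10)]
--
--     for d in D:
--         nums.remove(d)
--
--     num_min = str(min(nums))
--
--     ans = ""
--     flag = False
--
--     for i, ns in enumerate(reversed(str(N))):
--         n = int(ns)
--
--         if n not in nums or flag:
--             flag = False
--             upper_nums = [num for num in nums if num > n]
--
--             if len(upper_nums) == 0:
--                 flag = True
--             else:
--                 nm = min(upper_nums)
--                 ans = str(nm) + num_min * i
--         else:
--             ans = str(n) + ans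
--
--     if ans == "":
--         return str(min([num for num in nums if num > 0])) + num_min * len(str(N))
--     else:
--         return ans
-- ===== SOURCE B (Python) =====
-- def solve(N, K, D):
--     allowed = [d for d in range(10) if d not in D]
--     low = allowed[0]
--
--     def next_same(ds):
--         # smallest list of allowed digits of the same length that is >= ds
--         # (lexicographically), or None if there is none
--         if not ds:
--             return []
--         d, rest = ds[0], ds[1:]
--         if d in allowed:
--             t = next_same(rest)
--             if t is not None:
--                 return [d] + t
--         up = [a for a in allowed if a > d]
--         if up:
--             return [min(up)] + [low] * len(rest)
--         return None
--
--     ds = [int(c) for c in str(N)]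
--     t = next_same(ds)
--     if t is None:
--         t = [min(a for a in allowed if a > 0)] + [low] * len(ds)
--     return ''.join(map(str, t))
-- ===== Notes on version B (the rewrite author's own statement) =====
-- stated objective: alternative
-- what changed: Replaced A's least-significant-first stateful loop (carry flag + string accumulator rebuilt per position) by a most-significant-first recursive descent that computes the smallest same-length string of allowed digits >= N and falls back to the shortest longer one.
-- intended difference: On inputs where every number of len(str(N)) digits made of allowed digits is < N (except the corner where the last digit exceeds and all higher digits are >= the largest allowed digit, which A's final fallback handles), A returns a stale too-short string such as '0' for N=90, D=[9], while B returns the intended smallest allowed number >= N ('100'). — e.g. on solve(90, 1, [9]): A returns "0", B returns "100"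
-- outside the precondition, e.g. on solve(10, 9, [1, 2, 3, 4, 5, 6, 7, 8, 9]): A returns '0', B raises ValueError
import Mathlib
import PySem

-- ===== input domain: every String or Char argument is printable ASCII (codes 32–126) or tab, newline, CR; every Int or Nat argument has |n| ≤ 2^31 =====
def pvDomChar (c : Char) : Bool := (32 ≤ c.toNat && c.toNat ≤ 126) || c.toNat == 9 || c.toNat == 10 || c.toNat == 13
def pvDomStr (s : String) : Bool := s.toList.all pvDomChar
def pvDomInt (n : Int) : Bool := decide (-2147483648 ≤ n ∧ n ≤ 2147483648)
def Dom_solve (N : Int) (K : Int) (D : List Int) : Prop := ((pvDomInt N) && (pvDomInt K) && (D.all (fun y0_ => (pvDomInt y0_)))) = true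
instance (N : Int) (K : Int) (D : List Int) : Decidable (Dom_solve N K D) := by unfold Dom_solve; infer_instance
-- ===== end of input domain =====

-- B replaces A's least-significant-first stateful loop (carry flag + rebuilt string accumulator)
-- by a most-significant-first recursive descent computing the smallest same-length allowed digit
-- string ≥ N (falling back to the shortest longer one); B returns the intended value on the
-- exceptional inputs D_solve where A returns a stale too-short string.


-- ===== PORT A =====
-- the body of A's `for i, ns in enumerate(reversed(str(N)))` loop
def solveStep (nums : List Int) (numMin : List Char) (st : List Char × Bool) (p : Int × Char) : List Char × Bool :=
  let n : Int := (PySem.Int.ofChars? [p.2]).getD 0      -- n = int(ns); Pre_ keeps N ≥ 0 so ns is a digit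
  if (!(nums.contains n) || st.2) then
    let upperNums := nums.filter (fun num => decide (n < num))
    if upperNums.length = 0 then (st.1, true)
    else (PySem.Int.toChars ((PySem.List.min? upperNums (fun x => x)).getD 0) ++ PySem.List.pyRepeat numMin p.1, false)
  else (PySem.Int.toChars n ++ st.1, false)

def solve (N : Int) (K : Int) (D : List Int) : String :=
  let nums := D.foldl (fun l d => (PySem.List.remove? l d).getD l) [0,1,2,3,4,5,6,7,8,9]
  let numMin := PySem.Int.toChars ((PySem.List.min? nums (fun x => x)).getD 0)
  let r := (PySem.List.enumerate ((PySem.Int.toChars N).reverse) 0).foldl (solveStep nums numMin) ([], false)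
  if r.1 = [] then
    String.ofList (PySem.Int.toChars ((PySem.List.min? (nums.filter (fun num => decide (0 < num))) (fun x => x)).getD 0)
      ++ PySem.List.pyRepeat numMin (PySem.Str.len (PySem.Int.toStr N)))
  else String.ofList r.1

-- ===== PORT B =====
-- Source B's next_same: smallest list of allowed digits of the same length that is ≥ ds, else none
def nextAllowed (allowed : List Int) (low : Int) : List Int → Option (List Int)
  | [] => some []
  | d :: rest =>
    let keep : Option (List Int) :=
      if allowed.contains d then (nextAllowed allowed low rest).map (fun t => d :: t) else none
    match keep with
    | some t => some t
    | none =>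
      let up := allowed.filter (fun a => decide (d < a))
      if up.isEmpty then none
      else some (((PySem.List.min? up (fun x => x)).getD 0) :: List.replicate rest.length low)

def solve_alt (N : Int) (K : Int) (D : List Int) : String :=
  let allowed := (PySem.List.pyRange 0 10 1).filter (fun d => !(D.contains d))
  let low := PySem.List.pyGetD allowed 0 0              -- allowed[0]; Pre_ keeps allowed nonempty
  let ds := (PySem.Int.toChars N).map (fun c => (PySem.Int.ofChars? [c]).getD 0)
  let t := match nextAllowed allowed low ds with
    | some t => t
    | none => ((PySem.List.min? (allowed.filter (fun a => decide (0 < a))) (fun x => x)).getD 0)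
                :: List.replicate ds.length low
  PySem.Str.join "" (t.map (fun d => PySem.Int.toStr d))

-- ===== PRECONDITION & SPEC =====
-- Pre_ excludes exactly the inputs where a program raises: A raises ValueError on N < 0
-- (int('-')), on a duplicate or out-of-10-digit-range entry of D (list.remove), and when no
-- digit is allowed (min of an empty list); when every allowed digit is 0 (D ⊇ {1..9}) A still
-- returns on some inputs but B's own min() over the positive allowed digits naturally raises
-- ValueError there, so those inputs stay outside Pre_ (see claim.json "cites").
def Pre_solve (N : Int) (K : Int) (D : List Int) : Prop :=
  0 ≤ N ∧ D.Nodup ∧ (∀ d ∈ D, 0 ≤ d ∧ d ≤ 9) ∧ ∃ d ∈ ([1,2,3,4,5,6,7,8,9] : List Int), d ∉ D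
instance (N : Int) (K : Int) (D : List Int) : Decidable (Pre_solve N K D) := by
  unfold Pre_solve; infer_instance
def pvWitness_solve : Int × Int × List Int := (4621, 3, [0, 4, 7])

-- On inputs where every len(str(N))-digit number made only of allowed digits is < N — except the
-- corner where N's last digit exceeds and all its other digits are ≥ the largest allowed digit,
-- which A's final fallback happens to handle — A returns a stale too-short string (e.g. '0' for
-- N=90, D=[9]) while B returns the intended smallest allowed number ≥ N ('100').
def D_solve (N : Int) (K : Int) (D : List Int) : Prop :=
  let M := (((List.range 10).filterMap (fun (n : Nat) => if (n : Int) ∈ D then none else some ((n : Int)))).max?).getD 0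
  let ds := (Nat.digits 10 N.toNat).reverse.map (fun (n : Nat) => (n : Int))
  M < (ds.dropWhile (fun d => d == M)).headD M ∧
  ¬ (M < ds.getLastD M ∧ ∀ d ∈ ds.dropLast, M ≤ d)
instance (N : Int) (K : Int) (D : List Int) : Decidable (D_solve N K D) := by
  unfold D_solve; infer_instance

def Spec_solve (N : Int) (K : Int) (D : List Int) (out : String) : Prop :=
  ¬ D_solve N K D → out = solve_alt N K D
instance (N : Int) (K : Int) (D : List Int) (out : String) : Decidable (Spec_solve N K D out) := by
  unfold Spec_solve; infer_instance

def pvDiffWitness_solve : Int × Int × List Int := (90, 1, [9])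
def pvDiffWitnessOut_solve : String × String := ("0", "100")

-- ===== CLAIM (what is proved, stated in full; the proofs are below) =====
def Claim_unchanged_solve : Prop := ∀ (N : Int) (K : Int) (D : List Int), Dom_solve N K D → Pre_solve N K D → Spec_solve N K D (solve N K D)
def Claim_changed_solve : Prop := Dom_solve (pvDiffWitness_solve.1) (pvDiffWitness_solve.2.1) (pvDiffWitness_solve.2.2) ∧ Pre_solve (pvDiffWitness_solve.1) (pvDiffWitness_solve.2.1) (pvDiffWitness_solve.2.2) ∧ D_solve (pvDiffWitness_solve.1) (pvDiffWitness_solve.2.1) (pvDiffWitness_solve.2.2) ∧ solve (pvDiffWitness_solve.1) (pvDiffWitness_solve.2.1) (pvDiffWitness_solve.2.2) = pvDiffWitnessOut_solve.1 ∧ solve_alt (pvDiffWitness_solve.1) (pvDiffWitness_solve.2.1) (pvDiffWitness_solve.2.2) = pvDiffWitnessOut_solve.2 ∧ pvDiffWitnessOut_solve.1 ≠ pvDiffWitnessOut_solve.2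
def Claim_exact_solve : Prop := ∀ (N : Int) (K : Int) (D : List Int), Dom_solve N K D → Pre_solve N K D → D_solve N K D → solve N K D ≠ solve_alt N K D

-- ===== LEMMAS AND PROOFS =====

-- digit value of a digit char, and digit char of a small value
def pvVal (c : Char) : Int := (c.toNat : Int) - 48
def pvChr (d : Int) : Char := Nat.digitChar d.toNat

-- proof-side mirror of A's loop state (flag, ans) as structural recursion on the digit
-- characters of N listed most-significant first
def pvFlagG (S : List Int) : List Char → Bool
  | [] => false
  | c :: t => (!(S.contains (pvVal c)) || pvFlagG S t) &&
              decide ((S.filter (fun s => decide (pvVal c < s))).length = 0)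

def pvAnsG (S : List Int) (lc : Char) : List Char → List Char
  | [] => []
  | c :: t =>
    if (!(S.contains (pvVal c)) || pvFlagG S t) then
      if (S.filter (fun s => decide (pvVal c < s))).length = 0 then pvAnsG S lc t
      else PySem.Int.toChars ((PySem.List.min? (S.filter (fun s => decide (pvVal c < s))) (fun x => x)).getD 0)
             ++ List.replicate t.length lc
    else c :: pvAnsG S lc t

def pvIsDigit (c : Char) : Prop := 48 ≤ c.toNat ∧ c.toNat ≤ 57

theorem pv_digit_cases (c : Char) (h : pvIsDigit c) :
    c ∈ (['0','1','2','3','4','5','6','7','8','9'] : List Char) := by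
  obtain ⟨h1, h2⟩ := h
  have hc : Char.ofNat c.toNat = c := Char.ofNat_toNat c
  set n := c.toNat with hn
  interval_cases n <;> (rw [← hc]; decide)

theorem pv_ofChars_digit (c : Char) (h : pvIsDigit c) :
    PySem.Int.ofChars? [c] = some (pvVal c) := by
  have := pv_digit_cases c h
  fin_cases this <;> decide

theorem pv_chr_val (c : Char) (h : pvIsDigit c) : pvChr (pvVal c) = c := by
  have := pv_digit_cases c h
  fin_cases this <;> decide

theorem pv_toChars_small (d : Int) (h0 : 0 ≤ d) (h9 : d ≤ 9) :
    PySem.Int.toChars d = [pvChr d] := by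
  have hneg : ¬ d < 0 := by omega
  simp only [PySem.Int.toChars, hneg, if_false, pvChr]
  exact Nat.toDigits_of_lt_base (by omega)

theorem pv_digitChar_digit (m : Nat) (h : m < 10) : pvIsDigit (Nat.digitChar m) := by
  interval_cases m <;> (constructor <;> decide)

theorem pv_toDigits_digits (n : Nat) :
    Nat.toDigits 10 n ≠ [] ∧ ∀ c ∈ Nat.toDigits 10 n, pvIsDigit c := by
  induction n using Nat.strong_induction_on with
  | _ n IH =>
    rw [Nat.toDigits_eq_if (by norm_num)]
    by_cases hn : n < 10
    · simp only [hn, if_true]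
      refine ⟨by simp, ?_⟩
      intro c hc
      simp only [List.mem_singleton] at hc
      subst hc; exact pv_digitChar_digit n hn
    · simp only [hn, if_false]
      have hlt : n / 10 < n := Nat.div_lt_self (by omega) (by norm_num)
      obtain ⟨hne, hall⟩ := IH (n / 10) hlt
      refine ⟨by simp [hne], ?_⟩
      intro c hc
      rcases List.mem_append.mp hc with h | h
      · exact hall c h
      · simp only [List.mem_singleton] at h
        subst h; exact pv_digitChar_digit _ (Nat.mod_lt _ (by norm_num))

theorem pv_toChars_digits (N : Int) (h : 0 ≤ N) :
    PySem.Int.toChars N ≠ [] ∧ ∀ c ∈ PySem.Int.toChars N, pvIsDigit c := by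
  have hneg : ¬ N < 0 := by omega
  simp only [PySem.Int.toChars, hneg, if_false]
  exact pv_toDigits_digits N.toNat

theorem pv_toChars_ne_nil (x : Int) : PySem.Int.toChars x ≠ [] := by
  simp only [PySem.Int.toChars]
  split
  · simp
  · exact (pv_toDigits_digits x.toNat).1

-- A's successive list.remove over D is the filter
theorem pv_fold_remove (Dl : List Int) : ∀ (l : List Int), l.Nodup → Dl.Nodup →
    (∀ d ∈ Dl, d ∈ l) →
    Dl.foldl (fun l d => (PySem.List.remove? l d).getD l) l = l.filter (fun x => !(Dl.contains x)) := by
  induction Dl with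
  | nil => intro l _ _ _; simp
  | cons d Dl IH =>
    intro l hl hnd hmem
    have hdl : d ∈ l := hmem d (by simp)
    have h1 : (PySem.List.remove? l d).getD l = l.erase d := by
      rw [PySem.List.remove?_eq_some_erase l d hdl]; rfl
    have hstep : (d :: Dl).foldl (fun l d => (PySem.List.remove? l d).getD l) l
        = Dl.foldl (fun l d => (PySem.List.remove? l d).getD l) (l.erase d) := by
      simp [List.foldl_cons, h1]
    rw [hstep, IH (l.erase d) (hl.erase d) hnd.of_cons ?hmem]
    case hmem =>
      intro d' hd'
      have hne : d' ≠ d := fun he => (List.nodup_cons.mp hnd).1 (he ▸ hd')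
      exact (List.mem_erase_of_ne hne).mpr (hmem d' (by simp [hd']))
    rw [hl.erase_eq_filter d, List.filter_filter]
    apply List.filter_congr
    intro x _
    simp only [List.contains_cons, Bool.not_or, Bool.and_comm, bne]

-- A's fold over enumerate(reversed(str(N))) is the structural recursion pvAnsG/pvFlagG
theorem pv_foldA (S : List Int) (lc : Char) : ∀ (cs : List Char), (∀ c ∈ cs, pvIsDigit c) →
    (PySem.List.enumerate cs.reverse 0).foldl (solveStep S [lc]) ([], false)
      = (pvAnsG S lc cs, pvFlagG S cs) := by
  intro cs
  induction cs with
  | nil => intro _; rfl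
  | cons c t IH =>
    intro hd
    have hdc : pvIsDigit c := hd c (by simp)
    have hdt : ∀ x ∈ t, pvIsDigit x := fun x hx => hd x (by simp [hx])
    have hval : (0:Int) ≤ pvVal c ∧ pvVal c ≤ 9 := by
      obtain ⟨h1, h2⟩ := hdc; unfold pvVal; omega
    rw [List.reverse_cons, PySem.List.enumerate_append, List.foldl_append, IH hdt]
    simp only [List.length_reverse, PySem.List.enumerate_cons, PySem.List.enumerate_nil,
      List.foldl_cons, List.foldl_nil]
    simp only [solveStep, pv_ofChars_digit c hdc, Option.getD_some]
    have hchr : PySem.Int.toChars (pvVal c) = [c] := by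
      rw [pv_toChars_small (pvVal c) hval.1 hval.2, pv_chr_val c hdc]
    have htn : ((0:Int) + (t.length:Int)).toNat = t.length := by omega
    by_cases h1 : (!(S.contains (pvVal c)) || pvFlagG S t) = true
    · by_cases h2 : (S.filter (fun num => decide (pvVal c < num))).length = 0
      · simp only [pvAnsG, pvFlagG]
        rw [if_pos h1, if_pos h1, if_pos h2, if_pos h2]
        simp [h1, h2]
        simpa using h1
      · simp only [pvAnsG, pvFlagG]
        rw [if_pos h1, if_pos h1, if_neg h2, if_neg h2]
        simp [h1, decide_eq_false h2, PySem.List.pyRepeat_singleton, htn]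
        intro _
        have hne : (S.filter (fun num => decide (pvVal c < num))) ≠ [] := by
          simpa [← List.length_eq_zero_iff] using h2
        obtain ⟨x, hx⟩ := List.exists_mem_of_ne_nil _ hne
        rcases List.mem_filter.mp hx with ⟨hxs, hlt⟩
        exact ⟨x, hxs, by simpa using hlt⟩
    · simp only [pvAnsG, pvFlagG]
      rw [if_neg h1, if_neg h1]
      have h1' : (!(S.contains (pvVal c)) || pvFlagG S t) = false := by simpa using h1
      have hc : pvVal c ∈ S ∧ pvFlagG S t = false := by simpa [not_or] using h1
      simp [hchr, h1']
      intro hcontra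
      rcases hcontra with h | h
      · exact absurd hc.1 h
      · rw [hc.2] at h; cases h

theorem pv_foldl_min_eq (t : List Int) : ∀ x, (∀ y ∈ t, x ≤ y) → t.foldl min x = x := by
  induction t with
  | nil => intro x _; rfl
  | cons y t IH =>
    intro x hx
    have hxy : min x y = x := min_eq_left (hx y (by simp))
    rw [List.foldl_cons, hxy]
    exact IH x (fun z hz => hx z (by simp [hz]))

theorem pv_min_sorted (l : List Int) (h : l.Pairwise (· < ·)) :
    PySem.List.min? l (fun x => x) = l.head? := by
  cases l with
  | nil => rw [(PySem.List.min?_eq_none_iff _ _).mpr rfl]; rfl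
  | cons x t =>
    rw [PySem.List.min?_id_cons]
    have hx : ∀ y ∈ t, x ≤ y := fun y hy => le_of_lt ((List.pairwise_cons.mp h).1 y hy)
    rw [pv_foldl_min_eq t x hx]; rfl

-- the flag chain fails exactly when no same-length solution exists
theorem pv_flag_none (S : List Int) (low : Int) : ∀ cs : List Char,
    pvFlagG S cs = (nextAllowed S low (cs.map pvVal)).isNone := by
  intro cs
  induction cs with
  | nil => simp [pvFlagG, nextAllowed]
  | cons c t IH =>
    simp only [List.map_cons, pvFlagG, nextAllowed]
    by_cases hc : S.contains (pvVal c) = true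
    · have hcm : pvVal c ∈ S := by simpa using hc
      cases hnx : nextAllowed S low (t.map pvVal) with
      | some t' => simp [hc, hcm, hnx, IH]
      | none =>
        rw [hnx] at IH
        by_cases hu : (S.filter (fun a => decide (pvVal c < a))) = []
        · simp [hc, hcm, hnx, IH, hu]
        · simp [hc, hcm, hnx, IH, hu, List.length_eq_zero_iff]
    · have hc' : S.contains (pvVal c) = false := by simpa using hc
      have hcm : pvVal c ∉ S := by simpa using hc
      by_cases hu : (S.filter (fun a => decide (pvVal c < a))) = []
      · simp [hc', hcm, hu]
      · simp [hc', hcm, hu, List.length_eq_zero_iff]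

-- when a same-length solution exists, A's accumulator is exactly B's solution
theorem pv_ansG_bump (S : List Int) (low : Int) (lc : Char) (hlc : lc = pvChr low)
    (hsub : ∀ s ∈ S, 0 ≤ s ∧ s ≤ 9) (c : Char) (cs' : List Char) (t : List Int)
    (hcond : (!(S.contains (pvVal c)) || pvFlagG S cs') = true)
    (hnext : (if (S.filter (fun a => decide (pvVal c < a))).isEmpty = true then none
              else some (((PySem.List.min? (S.filter (fun a => decide (pvVal c < a))) (fun x => x)).getD 0)
                          :: List.replicate (cs'.map pvVal).length low)) = some t) :
    pvAnsG S lc (c :: cs') = t.map pvChr := by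
  by_cases hu : (S.filter (fun a => decide (pvVal c < a))) = []
  · rw [if_pos (by simp [hu])] at hnext; cases hnext
  · rw [if_neg (by simpa using hu)] at hnext
    injection hnext with ht
    subst ht
    obtain ⟨m, hm⟩ : ∃ m, PySem.List.min? (S.filter (fun a => decide (pvVal c < a))) (fun x => x) = some m := by
      cases hmm : PySem.List.min? (S.filter (fun a => decide (pvVal c < a))) (fun x => x) with
      | none => exact absurd ((PySem.List.min?_eq_none_iff _ _).mp hmm) hu
      | some m => exact ⟨m, rfl⟩
    have hmS : m ∈ S := (List.mem_filter.mp (PySem.List.min?_mem hm)).1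
    obtain ⟨hm0, hm9⟩ := hsub m hmS
    simp only [pvAnsG]
    rw [if_pos hcond, if_neg (by simpa [List.length_eq_zero_iff] using hu), hm]
    simp [pv_toChars_small m hm0 hm9, hlc]

theorem pv_ansG_some (S : List Int) (low : Int) (lc : Char) (hlc : lc = pvChr low)
    (hsub : ∀ s ∈ S, 0 ≤ s ∧ s ≤ 9) :
    ∀ (cs : List Char) (t : List Int), (∀ c ∈ cs, pvIsDigit c) →
    nextAllowed S low (cs.map pvVal) = some t → pvAnsG S lc cs = t.map pvChr := by
  intro cs
  induction cs with
  | nil =>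
    intro t _ ht
    simp only [List.map_nil, nextAllowed, Option.some.injEq] at ht
    subst ht; rfl
  | cons c cs' IH =>
    intro t hd hnext
    have hdc : pvIsDigit c := hd c (by simp)
    have hdt : ∀ x ∈ cs', pvIsDigit x := fun x hx => hd x (by simp [hx])
    simp only [List.map_cons, nextAllowed] at hnext
    by_cases hc : S.contains (pvVal c) = true
    · cases hnx : nextAllowed S low (cs'.map pvVal) with
      | some t' =>
        rw [hnx] at hnext
        simp only [hc, if_true, Option.map_some] at hnext
        injection hnext with ht
        subst ht
        have hflag : pvFlagG S cs' = false := by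
          rw [pv_flag_none S low cs', hnx]; rfl
        have hcm : pvVal c ∈ S := by simpa using hc
        simp only [pvAnsG]
        rw [if_neg (by simp [hcm, hflag])]
        rw [IH t' hdt hnx]
        simp [pv_chr_val c hdc]
      | none =>
        rw [hnx] at hnext
        simp only [hc, if_true, Option.map_none] at hnext
        have hflag : pvFlagG S cs' = true := by
          rw [pv_flag_none S low cs', hnx]; rfl
        exact pv_ansG_bump S low lc hlc hsub c cs' t (by simp [hflag]) hnext
    · have hc' : S.contains (pvVal c) = false := by simpa using hc
      simp only [hc', Bool.false_eq_true, if_false] at hnext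
      have hcm : pvVal c ∉ S := by simpa using hc
      exact pv_ansG_bump S low lc hlc hsub c cs' t (by simp [hcm]) hnext

theorem pv_next_length (S : List Int) (low : Int) : ∀ (ds t : List Int),
    nextAllowed S low ds = some t → t.length = ds.length := by
  intro ds
  induction ds with
  | nil =>
    intro t ht
    simp only [nextAllowed, Option.some.injEq] at ht
    subst ht; rfl
  | cons d rest IH =>
    intro t ht
    simp only [nextAllowed] at ht
    by_cases hc : S.contains d = true
    · cases hnx : nextAllowed S low rest with
      | some t' =>
        rw [hnx] at ht
        simp only [hc, if_true, Option.map_some, Option.some.injEq] at ht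
        subst ht
        simp [IH t' hnx]
      | none =>
        rw [hnx] at ht
        simp only [hc, if_true, Option.map_none] at ht
        split at ht
        · cases ht
        · injection ht with ht; subst ht; simp
    · have hc' : S.contains d = false := by simpa using hc
      simp only [hc', Bool.false_eq_true, if_false] at ht
      split at ht
      · cases ht
      · injection ht with ht; subst ht; simp

theorem pv_next_digits (S : List Int) (low : Int) (hsub : ∀ s ∈ S, 0 ≤ s ∧ s ≤ 9)
    (hlow : 0 ≤ low ∧ low ≤ 9) : ∀ (ds t : List Int), (∀ d ∈ ds, 0 ≤ d ∧ d ≤ 9) →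
    nextAllowed S low ds = some t → ∀ d ∈ t, 0 ≤ d ∧ d ≤ 9 := by
  intro ds
  induction ds with
  | nil =>
    intro t _ ht
    simp only [nextAllowed, Option.some.injEq] at ht
    subst ht; simp
  | cons d rest IH =>
    intro t hds ht
    have hdd : 0 ≤ d ∧ d ≤ 9 := hds d (by simp)
    have hrest : ∀ x ∈ rest, 0 ≤ x ∧ x ≤ 9 := fun x hx => hds x (by simp [hx])
    simp only [nextAllowed] at ht
    have hbump : ∀ (u : List Int),
        (if (S.filter (fun a => decide (d < a))).isEmpty = true then none
         else some (((PySem.List.min? (S.filter (fun a => decide (d < a))) (fun x => x)).getD 0)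
                     :: List.replicate rest.length low)) = some u →
        ∀ x ∈ u, 0 ≤ x ∧ x ≤ 9 := by
      intro u hu
      split at hu
      · cases hu
      · injection hu with hu
        subst hu
        intro x hx
        rcases List.mem_cons.mp hx with hx | hx
        · subst hx
          cases hmm : PySem.List.min? (S.filter (fun a => decide (d < a))) (fun x => x) with
          | none => simp
          | some m =>
            have hmS : m ∈ S := (List.mem_filter.mp (PySem.List.min?_mem hmm)).1
            simpa [hmm] using hsub m hmS
        · have := List.eq_of_mem_replicate hx
          subst this; exact hlow
    by_cases hc : S.contains d = true
    · cases hnx : nextAllowed S low rest with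
      | some t' =>
        rw [hnx] at ht
        simp only [hc, if_true, Option.map_some, Option.some.injEq] at ht
        subst ht
        intro x hx
        rcases List.mem_cons.mp hx with hx | hx
        · subst hx; exact hdd
        · exact IH t' hrest hnx x hx
      | none =>
        rw [hnx] at ht
        simp only [hc, if_true, Option.map_none] at ht
        exact hbump t ht
    · have hc' : S.contains d = false := by simpa using hc
      simp only [hc', Bool.false_eq_true, if_false] at ht
      exact hbump t ht

-- there is no same-length solution exactly when the digits exceed M…M (the D_ "grows" test)
theorem pv_none_iff (S : List Int) (low M : Int) (hM : M ∈ S) (hmax : ∀ s ∈ S, s ≤ M) :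
    ∀ cs : List Char,
    ((nextAllowed S low (cs.map pvVal)).isNone = true ↔
      M < (((cs.map pvVal).dropWhile (fun d => d == M)).headD M)) := by
  intro cs
  induction cs with
  | nil => simp [nextAllowed]
  | cons c t IH =>
    simp only [List.map_cons]
    by_cases hdM : pvVal c = M
    · have hcm : pvVal c ∈ S := hdM ▸ hM
      have hcont : S.contains (pvVal c) = true := by simpa using hcm
      have hup : S.filter (fun a => decide (pvVal c < a)) = [] := by
        apply List.filter_eq_nil_iff.mpr
        intro a ha
        simpa using not_lt.mpr (hdM ▸ hmax a ha)
      have hred : (nextAllowed S low (pvVal c :: t.map pvVal)).isNone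
          = (nextAllowed S low (t.map pvVal)).isNone := by
        cases hnx : nextAllowed S low (t.map pvVal) <;>
          simp [nextAllowed, hcont, hcm, hnx, hup]
      rw [hred, List.dropWhile_cons_of_pos (by simp [hdM])]
      exact IH
    · rw [List.dropWhile_cons_of_neg (by simp [hdM])]
      simp only [List.headD_cons]
      rcases lt_trichotomy (pvVal c) M with hlt | heq | hgt
      · have hupne : S.filter (fun a => decide (pvVal c < a)) ≠ [] :=
          List.ne_nil_of_mem (List.mem_filter.mpr ⟨hM, by simpa using hlt⟩)
        have hfalse : (nextAllowed S low (pvVal c :: t.map pvVal)).isNone = false := by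
          cases hnxx : nextAllowed S low (t.map pvVal) <;>
            by_cases hcc : pvVal c ∈ S <;>
              simp [nextAllowed, hcc, hnxx, List.isEmpty_iff, hupne]
        rw [hfalse]
        constructor
        · intro h; cases h
        · intro h; exact absurd h (not_lt.mpr (le_of_lt hlt))
      · exact absurd heq hdM
      · have hnotin : pvVal c ∉ S := fun hm => absurd (hmax _ hm) (not_le.mpr hgt)
        have hcont : S.contains (pvVal c) = false := by simpa using hnotin
        have hup : S.filter (fun a => decide (pvVal c < a)) = [] := by
          apply List.filter_eq_nil_iff.mpr
          intro a ha
          simpa using not_lt.mpr (le_of_lt (lt_of_le_of_lt (hmax a ha) hgt))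
        have htrue : (nextAllowed S low (pvVal c :: t.map pvVal)).isNone = true := by
          simp [nextAllowed, hnotin, hup]
        rw [htrue]
        simp [hgt]

-- in the all-fail corner A's accumulator stays empty (and conversely)
theorem pv_filterMap_allowed (D : List Int) (l : List Nat) :
    (l.filterMap (fun (n : Nat) => if (n : Int) ∈ D then none else some ((n : Int))))
      = (l.map (fun (n : Nat) => (n : Int))).filter (fun d => !(D.contains d)) := by
  induction l with
  | nil => rfl
  | cons n l IH =>
    rw [List.filterMap_cons, List.map_cons, List.filter_cons]
    by_cases h : (n : Int) ∈ D
    · rw [if_pos h]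
      have hb : (!D.contains ((n : Nat) : Int)) = false := by simpa using h
      rw [hb]
      simp only [Bool.false_eq_true, if_false]
      exact IH
    · rw [if_neg h]
      have hb : (!D.contains ((n : Nat) : Int)) = true := by simpa using h
      rw [hb]
      simp only [if_true]
      rw [IH]

theorem pv_val_digitChar (m : Nat) (h : m < 10) : pvVal (Nat.digitChar m) = (m : Int) := by
  interval_cases m <;> decide

theorem pv_digits_rev (n : Nat) (h : 0 < n) :
    (Nat.digits 10 n).reverse.map (fun (m : Nat) => (m : Int)) = (Nat.toDigits 10 n).map pvVal := by
  induction n using Nat.strong_induction_on with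
  | _ n IH =>
    rw [Nat.digits_def' (by norm_num) h, Nat.toDigits_eq_if (by norm_num)]
    by_cases h10 : n < 10
    · rw [if_pos h10, Nat.div_eq_of_lt h10]
      rw [List.map_cons, List.map_nil, pv_val_digitChar n h10]
      simp [Nat.mod_eq_of_lt h10]
    · rw [if_neg h10]
      have hpos : 0 < n / 10 := Nat.div_pos (le_of_not_gt h10) (by norm_num)
      rw [List.reverse_cons, List.map_append,
        IH (n / 10) (Nat.div_lt_self h (by norm_num)) hpos]
      rw [List.map_append]
      simp [pv_val_digitChar (n % 10) (Nat.mod_lt _ (by norm_num))]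

theorem pv_dsD_eq (N : Int) (h0 : 0 < N) :
    (Nat.digits 10 N.toNat).reverse.map (fun (n : Nat) => (n : Int))
      = (PySem.Int.toChars N).map pvVal := by
  have htc : PySem.Int.toChars N = Nat.toDigits 10 N.toNat := by
    simp [PySem.Int.toChars, not_lt.mpr (le_of_lt h0)]
  rw [htc]
  exact pv_digits_rev N.toNat (by omega)

theorem pv_getLastD_irrel (l : List Char) (h : l ≠ []) (d d' : Char) :
    l.getLastD d = l.getLastD d' := by
  cases l with
  | nil => exact absurd rfl h
  | cons x xs => simp [List.getLastD_eq_getLast?, List.getLast?_cons]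

theorem pv_ansG_empty_of_allfail (S : List Int) (lc : Char) (M : Int)
    (hmax : ∀ s ∈ S, s ≤ M) :
    ∀ cs : List Char, cs ≠ [] → M < pvVal (cs.getLastD '0') →
    (∀ c ∈ cs.dropLast, M ≤ pvVal c) →
    pvAnsG S lc cs = [] ∧ pvFlagG S cs = true := by
  intro cs
  induction cs with
  | nil => intro h; exact absurd rfl h
  | cons c t IH =>
    intro _ hlast hall
    by_cases ht : t = []
    · subst ht
      have hlc' : M < pvVal c := by simpa [List.getLastD] using hlast
      have hnotin : pvVal c ∉ S := fun hm => absurd (hmax _ hm) (not_le.mpr hlc')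
      have hcont : S.contains (pvVal c) = false := by simpa using hnotin
      have hup : S.filter (fun s => decide (pvVal c < s)) = [] := by
        apply List.filter_eq_nil_iff.mpr
        intro a ha
        simpa using not_lt.mpr (le_of_lt (lt_of_le_of_lt (hmax a ha) hlc'))
      have hcont2 := hcont
      simp [pvAnsG, pvFlagG, hcont, hup, hnotin]
    · have hdl : (c :: t).dropLast = c :: t.dropLast := List.dropLast_cons_of_ne_nil (l := t) ht
      have hMc : M ≤ pvVal c := hall c (by simp [hdl])
      have hallt : ∀ x ∈ t.dropLast, M ≤ pvVal x := fun x hx => hall x (by simp [hdl, hx])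
      have hlastt : M < pvVal (t.getLastD '0') := by
        have h1 : (c :: t).getLastD '0' = t.getLastD c := (List.getLastD_cons (l := t))
        rw [h1, pv_getLastD_irrel t ht c '0'] at hlast
        exact hlast
      obtain ⟨ha, hf⟩ := IH ht hlastt hallt
      have hup : S.filter (fun s => decide (pvVal c < s)) = [] := by
        apply List.filter_eq_nil_iff.mpr
        intro a ha'
        simpa using not_lt.mpr (le_trans (hmax a ha') hMc)
      simp [pvAnsG, pvFlagG, ha, hf, hup]

theorem pv_ansG_nonempty_of_not_allfail (S : List Int) (lc : Char) (M : Int)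
    (hM : M ∈ S) :
    ∀ cs : List Char, pvAnsG S lc cs = [] →
    cs = [] ∨ (M < pvVal (cs.getLastD '0') ∧ ∀ c ∈ cs.dropLast, M ≤ pvVal c) := by
  intro cs
  induction cs with
  | nil => intro _; exact Or.inl rfl
  | cons c t IH =>
    intro hans
    right
    simp only [pvAnsG] at hans
    by_cases h1 : (!(S.contains (pvVal c)) || pvFlagG S t) = true
    · rw [if_pos h1] at hans
      by_cases h2 : (S.filter (fun s => decide (pvVal c < s))).length = 0
      · rw [if_pos h2] at hans
        have hMle : M ≤ pvVal c := by
          by_contra hcon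
          have hmem : M ∈ S.filter (fun s => decide (pvVal c < s)) :=
            List.mem_filter.mpr ⟨hM, by simpa using not_le.mp hcon⟩
          exact absurd (List.length_eq_zero_iff.mp h2) (List.ne_nil_of_mem hmem)
        by_cases ht : t = []
        · subst ht
          have hnotin : pvVal c ∉ S := by
            rcases (by simpa using h1 : pvVal c ∉ S ∨ pvFlagG S ([]:List Char) = true) with h | h
            · exact h
            · cases h
          have hlt : M < pvVal c := lt_of_le_of_ne hMle (fun he => hnotin (he ▸ hM))
          refine ⟨by simpa [List.getLastD] using hlt, ?_⟩
          intro x hx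
          simp at hx
        · rcases IH hans with h | ⟨hlast, hall⟩
          · exact absurd h ht
          · have hdl : (c :: t).dropLast = c :: t.dropLast := List.dropLast_cons_of_ne_nil (l := t) ht
            refine ⟨?_, ?_⟩
            · rw [(List.getLastD_cons (l := t)), pv_getLastD_irrel t ht c '0']
              exact hlast
            · intro x hx
              rw [hdl] at hx
              rcases List.mem_cons.mp hx with hx | hx
              · subst hx; exact hMle
              · exact hall x hx
      · rw [if_neg h2] at hans
        exact absurd (List.append_eq_nil_iff.mp hans).1 (pv_toChars_ne_nil _)
    · rw [if_neg h1] at hans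
      cases hans

theorem pv_ansG_length (S : List Int) (lc : Char) (hsub : ∀ s ∈ S, 0 ≤ s ∧ s ≤ 9) :
    ∀ cs : List Char, (pvAnsG S lc cs).length ≤ cs.length := by
  intro cs
  induction cs with
  | nil => simp [pvAnsG]
  | cons c t IH =>
    simp only [pvAnsG]
    split_ifs with h1 h2
    · exact le_trans IH (by simp)
    · have hone : (PySem.Int.toChars ((PySem.List.min? (S.filter (fun s => decide (pvVal c < s))) (fun x => x)).getD 0)).length = 1 := by
        cases hmm : PySem.List.min? (S.filter (fun s => decide (pvVal c < s))) (fun x => x) with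
        | none => simp [pv_toChars_small 0 (by omega) (by omega)]
        | some m =>
          have hmS : m ∈ S := (List.mem_filter.mp (PySem.List.min?_mem hmm)).1
          obtain ⟨hm0, hm9⟩ := hsub m hmS
          simp [pv_toChars_small m hm0 hm9]
      simp [hone, Nat.add_comm]
    · simpa using IH

theorem pv_join_digits (t : List Int) (h : ∀ d ∈ t, 0 ≤ d ∧ d ≤ 9) :
    (PySem.Str.join "" (t.map (fun d => PySem.Int.toStr d))).toList = t.map pvChr := by
  rw [PySem.Str.toList_join]
  have h1 : (List.map (fun d => PySem.Int.toStr d) t).map String.toList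
      = List.map (fun c => [c]) (t.map pvChr) := by
    simp only [List.map_map]
    apply List.map_congr_left
    intro d hd
    simp only [Function.comp_apply, PySem.Int.toList_toStr]
    exact pv_toChars_small d (h d hd).1 (h d hd).2
  rw [h1]
  have h2 : ("" : String).toList = [] := rfl
  rw [h2, PySem.Chars.join_nil_singletons]

-- ===== VERDICT (by name: the statement is the Claim_ definition above) =====
theorem solve_spec : Claim_unchanged_solve := by
  unfold Claim_unchanged_solve
  intro N K D _ hpre
  intro hnD
  obtain ⟨hN, hnd, hDsub, d₀, hd₀mem, hd₀notin⟩ := hpre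
  set S := (PySem.List.pyRange 0 10 1).filter (fun d => !(D.contains d)) with hS
  have hbase : PySem.List.pyRange 0 10 1 = ([0,1,2,3,4,5,6,7,8,9] : List Int) := by decide
  have hSsub : ∀ s ∈ S, 0 ≤ s ∧ s ≤ 9 := by
    intro s hs
    rw [hS, hbase] at hs
    have hm := (List.mem_filter.mp hs).1
    fin_cases hm <;> exact ⟨by norm_num, by norm_num⟩
  have hSsorted : S.Pairwise (· < ·) := by
    rw [hS, hbase]
    exact List.Pairwise.filter _ (by decide)
  have hd₀S : d₀ ∈ S := by
    rw [hS, hbase]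
    refine List.mem_filter.mpr ⟨?_, by simpa using hd₀notin⟩
    fin_cases hd₀mem <;> decide
  have hSne : S ≠ [] := List.ne_nil_of_mem hd₀S
  obtain ⟨s₀, S', hScons⟩ := List.exists_cons_of_ne_nil hSne
  have hmin : PySem.List.min? S (fun x => x) = some s₀ := by
    rw [pv_min_sorted S hSsorted, hScons]; rfl
  have hs₀ : 0 ≤ s₀ ∧ s₀ ≤ 9 := hSsub s₀ (by rw [hScons]; simp)
  obtain ⟨M, hMsome⟩ : ∃ M, S.max? = some M := by
    cases hmm : S.max? with
    | none => exact absurd (List.max?_eq_none_iff.mp hmm) hSne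
    | some M => exact ⟨M, rfl⟩
  have hMdef : ((((List.range 10).filterMap (fun (n : Nat) => if (n : Int) ∈ D then none
      else some ((n : Int)))).max?).getD 0) = M := by
    rw [pv_filterMap_allowed D]
    have hr : (List.range 10).map (fun (n : Nat) => (n : Int)) = PySem.List.pyRange 0 10 1 := by decide
    rw [hr, ← hS, hMsome]; rfl
  have hM : M ∈ S := List.max?_mem hMsome
  have hmax : ∀ s ∈ S, s ≤ M := fun s hs => ((List.max?_le_iff hMsome).mp le_rfl) s hs
  have hM1 : 1 ≤ M := by
    have hd1 : 1 ≤ d₀ := by fin_cases hd₀mem <;> norm_num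
    have := hmax d₀ hd₀S
    omega
  have hnums : D.foldl (fun l d => (PySem.List.remove? l d).getD l) [0,1,2,3,4,5,6,7,8,9]
      = S := by
    rw [pv_fold_remove D [0,1,2,3,4,5,6,7,8,9] (by decide) hnd ?hmem, hS, hbase]
    case hmem =>
      intro d hd
      obtain ⟨h0, h9⟩ := hDsub d hd
      simp only [List.mem_cons, List.not_mem_nil, or_false]
      omega
  obtain ⟨hcne, hcd⟩ := pv_toChars_digits N hN
  set cs := PySem.Int.toChars N with hcs
  have hds : cs.map (fun c => (PySem.Int.ofChars? [c]).getD 0) = cs.map pvVal := by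
    apply List.map_congr_left
    intro c hc
    rw [pv_ofChars_digit c (hcd c hc)]; rfl
  have hnumMin : PySem.Int.toChars ((PySem.List.min? S (fun x => x)).getD 0) = [pvChr s₀] := by
    rw [hmin]; exact pv_toChars_small s₀ hs₀.1 hs₀.2
  have hlenrep : PySem.List.pyRepeat [pvChr s₀] (PySem.Str.len (PySem.Int.toStr N))
      = List.replicate cs.length (pvChr s₀) := by
    rw [PySem.List.pyRepeat_singleton]
    congr 1
    simp [PySem.Str.len, PySem.Int.toList_toStr, ← hcs]
  have hmstar : 0 ≤ ((PySem.List.min? (S.filter (fun num => decide (0 < num))) (fun x => x)).getD 0)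
      ∧ ((PySem.List.min? (S.filter (fun num => decide (0 < num))) (fun x => x)).getD 0) ≤ 9 := by
    cases hmm : PySem.List.min? (S.filter (fun num => decide (0 < num))) (fun x => x) with
    | none => constructor <;> norm_num
    | some m =>
      have hmS : m ∈ S := (List.mem_filter.mp (PySem.List.min?_mem hmm)).1
      simpa using hSsub m hmS
  have hsolveA : solve N K D = (if pvAnsG S (pvChr s₀) cs = [] then
      String.ofList (PySem.Int.toChars ((PySem.List.min? (S.filter (fun num => decide (0 < num))) (fun x => x)).getD 0)
        ++ List.replicate cs.length (pvChr s₀))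
    else String.ofList (pvAnsG S (pvChr s₀) cs)) := by
    simp only [solve]
    rw [hnums, hnumMin, pv_foldA S (pvChr s₀) cs hcd, hlenrep]
  have hsolveB : solve_alt N K D = PySem.Str.join ""
      ((match nextAllowed S s₀ (cs.map pvVal) with
        | some t => t
        | none => ((PySem.List.min? (S.filter (fun num => decide (0 < num))) (fun x => x)).getD 0)
                    :: List.replicate (cs.map pvVal).length s₀).map (fun d => PySem.Int.toStr d)) := by
    simp only [solve_alt]
    rw [hds]
    have hlow : PySem.List.pyGetD S 0 0 = s₀ := by
      rw [PySem.List.pyGetD_zero, hScons]; rfl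
    rw [hlow]
  cases hnx : nextAllowed S s₀ (cs.map pvVal) with
  | some t =>
    have hans := pv_ansG_some S s₀ (pvChr s₀) rfl hSsub cs t hcd hnx
    have htlen := pv_next_length S s₀ _ t hnx
    have hne : pvAnsG S (pvChr s₀) cs ≠ [] := by
      rw [hans]
      intro h
      rw [List.map_eq_nil_iff] at h
      subst h
      simp only [List.length_nil, List.length_map] at htlen
      exact hcne (List.length_eq_zero_iff.mp htlen.symm)
    have hts : ∀ d ∈ t, 0 ≤ d ∧ d ≤ 9 := by
      refine pv_next_digits S s₀ hSsub hs₀ (cs.map pvVal) t ?_ hnx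
      intro d hd
      obtain ⟨c, hc, rfl⟩ := List.mem_map.mp hd
      obtain ⟨hl, hr⟩ := hcd c hc
      unfold pvVal
      omega
    rw [hsolveA, if_neg hne, hsolveB, hnx, hans]
    rw [← String.ofList_toList (s := PySem.Str.join "" (t.map (fun d => PySem.Int.toStr d)))]
    rw [pv_join_digits t hts]
  | none =>
    have hgrow : M < (((cs.map pvVal).dropWhile (fun d => d == M)).headD M) :=
      (pv_none_iff S s₀ M hM hmax cs).mp (by rw [hnx]; rfl)
    by_cases hN0 : N = 0
    · exfalso
      have hcs0 : cs = ['0'] := by rw [hcs, hN0]; decide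
      rw [hcs0] at hgrow
      have hpv0 : pvVal '0' = 0 := by decide
      rw [List.map_cons, List.map_nil, hpv0,
        List.dropWhile_cons_of_neg (by simp; omega), List.headD_cons] at hgrow
      omega
    have hNpos : 0 < N := lt_of_le_of_ne hN (Ne.symm hN0)
    have hdsd : (Nat.digits 10 N.toNat).reverse.map (fun (n : Nat) => (n : Int))
        = cs.map pvVal := by rw [hcs]; exact pv_dsD_eq N hNpos
    have hall : M < (cs.map pvVal).getLastD M ∧ ∀ d ∈ (cs.map pvVal).dropLast, M ≤ d := by
      by_contra hcon
      apply hnD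
      show D_solve N K D
      unfold D_solve
      rw [hMdef, hdsd]
      exact ⟨hgrow, hcon⟩
    obtain ⟨hlast, halld⟩ := hall
    have hlast' : M < pvVal (cs.getLastD '0') := by
      have h1 : (cs.map pvVal).getLastD M = pvVal (cs.getLastD '0') := by
        rw [List.getLastD_eq_getLast?, List.getLastD_eq_getLast?, List.getLast?_map]
        cases hgl : cs.getLast? with
        | none => exact absurd (List.getLast?_eq_none_iff.mp hgl) hcne
        | some x => rfl
      rw [h1] at hlast
      exact hlast
    have halld' : ∀ c ∈ cs.dropLast, M ≤ pvVal c := by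
      intro c hc
      have hmem : pvVal c ∈ (cs.map pvVal).dropLast := by
        rw [← List.map_dropLast]
        exact List.mem_map_of_mem hc
      exact halld _ hmem
    obtain ⟨hempty, _⟩ := pv_ansG_empty_of_allfail S (pvChr s₀) M hmax cs hcne hlast' halld'
    rw [hsolveA, if_pos hempty, hsolveB, hnx]
    have hOK : ∀ d ∈ (((PySem.List.min? (S.filter (fun num => decide (0 < num))) (fun x => x)).getD 0)
        :: List.replicate (cs.map pvVal).length s₀), 0 ≤ d ∧ d ≤ 9 := by
      intro d hd
      rcases List.mem_cons.mp hd with rfl | hd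
      · exact hmstar
      · rw [List.eq_of_mem_replicate hd]; exact hs₀
    rw [← String.ofList_toList (s := PySem.Str.join "" _), pv_join_digits _ hOK]
    congr 1
    rw [pv_toChars_small _ hmstar.1 hmstar.2]
    simp [List.map_replicate]

theorem solve_changed : Claim_changed_solve := by
  unfold Claim_changed_solve; decide

theorem solve_tight : Claim_exact_solve := by
  unfold Claim_exact_solve
  intro N K D _ hpre hD
  obtain ⟨hgrowD, hnall⟩ := hD
  obtain ⟨hN, hnd, hDsub, d₀, hd₀mem, hd₀notin⟩ := hpre
  set S := (PySem.List.pyRange 0 10 1).filter (fun d => !(D.contains d)) with hS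
  have hbase : PySem.List.pyRange 0 10 1 = ([0,1,2,3,4,5,6,7,8,9] : List Int) := by decide
  have hSsub : ∀ s ∈ S, 0 ≤ s ∧ s ≤ 9 := by
    intro s hs
    rw [hS, hbase] at hs
    have hm := (List.mem_filter.mp hs).1
    fin_cases hm <;> exact ⟨by norm_num, by norm_num⟩
  have hSsorted : S.Pairwise (· < ·) := by
    rw [hS, hbase]
    exact List.Pairwise.filter _ (by decide)
  have hd₀S : d₀ ∈ S := by
    rw [hS, hbase]
    refine List.mem_filter.mpr ⟨?_, by simpa using hd₀notin⟩
    fin_cases hd₀mem <;> decide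
  have hSne : S ≠ [] := List.ne_nil_of_mem hd₀S
  obtain ⟨s₀, S', hScons⟩ := List.exists_cons_of_ne_nil hSne
  have hmin : PySem.List.min? S (fun x => x) = some s₀ := by
    rw [pv_min_sorted S hSsorted, hScons]; rfl
  have hs₀ : 0 ≤ s₀ ∧ s₀ ≤ 9 := hSsub s₀ (by rw [hScons]; simp)
  obtain ⟨M, hMsome⟩ : ∃ M, S.max? = some M := by
    cases hmm : S.max? with
    | none => exact absurd (List.max?_eq_none_iff.mp hmm) hSne
    | some M => exact ⟨M, rfl⟩
  have hMdef : ((((List.range 10).filterMap (fun (n : Nat) => if (n : Int) ∈ D then none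
      else some ((n : Int)))).max?).getD 0) = M := by
    rw [pv_filterMap_allowed D]
    have hr : (List.range 10).map (fun (n : Nat) => (n : Int)) = PySem.List.pyRange 0 10 1 := by decide
    rw [hr, ← hS, hMsome]; rfl
  have hM : M ∈ S := List.max?_mem hMsome
  have hmax : ∀ s ∈ S, s ≤ M := fun s hs => ((List.max?_le_iff hMsome).mp le_rfl) s hs
  have hM1 : 1 ≤ M := by
    have hd1 : 1 ≤ d₀ := by fin_cases hd₀mem <;> norm_num
    have := hmax d₀ hd₀S
    omega
  have hnums : D.foldl (fun l d => (PySem.List.remove? l d).getD l) [0,1,2,3,4,5,6,7,8,9]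
      = S := by
    rw [pv_fold_remove D [0,1,2,3,4,5,6,7,8,9] (by decide) hnd ?hmem, hS, hbase]
    case hmem =>
      intro d hd
      obtain ⟨h0, h9⟩ := hDsub d hd
      simp only [List.mem_cons, List.not_mem_nil, or_false]
      omega
  obtain ⟨hcne, hcd⟩ := pv_toChars_digits N hN
  set cs := PySem.Int.toChars N with hcs
  have hds : cs.map (fun c => (PySem.Int.ofChars? [c]).getD 0) = cs.map pvVal := by
    apply List.map_congr_left
    intro c hc
    rw [pv_ofChars_digit c (hcd c hc)]; rfl
  have hnumMin : PySem.Int.toChars ((PySem.List.min? S (fun x => x)).getD 0) = [pvChr s₀] := by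
    rw [hmin]; exact pv_toChars_small s₀ hs₀.1 hs₀.2
  have hlenrep : PySem.List.pyRepeat [pvChr s₀] (PySem.Str.len (PySem.Int.toStr N))
      = List.replicate cs.length (pvChr s₀) := by
    rw [PySem.List.pyRepeat_singleton]
    congr 1
    simp [PySem.Str.len, PySem.Int.toList_toStr, ← hcs]
  have hmstar : 0 ≤ ((PySem.List.min? (S.filter (fun num => decide (0 < num))) (fun x => x)).getD 0)
      ∧ ((PySem.List.min? (S.filter (fun num => decide (0 < num))) (fun x => x)).getD 0) ≤ 9 := by
    cases hmm : PySem.List.min? (S.filter (fun num => decide (0 < num))) (fun x => x) with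
    | none => constructor <;> norm_num
    | some m =>
      have hmS : m ∈ S := (List.mem_filter.mp (PySem.List.min?_mem hmm)).1
      simpa using hSsub m hmS
  have hsolveA : solve N K D = (if pvAnsG S (pvChr s₀) cs = [] then
      String.ofList (PySem.Int.toChars ((PySem.List.min? (S.filter (fun num => decide (0 < num))) (fun x => x)).getD 0)
        ++ List.replicate cs.length (pvChr s₀))
    else String.ofList (pvAnsG S (pvChr s₀) cs)) := by
    simp only [solve]
    rw [hnums, hnumMin, pv_foldA S (pvChr s₀) cs hcd, hlenrep]
  have hsolveB : solve_alt N K D = PySem.Str.join ""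
      ((match nextAllowed S s₀ (cs.map pvVal) with
        | some t => t
        | none => ((PySem.List.min? (S.filter (fun num => decide (0 < num))) (fun x => x)).getD 0)
                    :: List.replicate (cs.map pvVal).length s₀).map (fun d => PySem.Int.toStr d)) := by
    simp only [solve_alt]
    rw [hds]
    have hlow : PySem.List.pyGetD S 0 0 = s₀ := by
      rw [PySem.List.pyGetD_zero, hScons]; rfl
    rw [hlow]
  have hlastmap : (cs.map pvVal).getLastD M = pvVal (cs.getLastD '0') := by
    rw [List.getLastD_eq_getLast?, List.getLastD_eq_getLast?, List.getLast?_map]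
    cases hgl : cs.getLast? with
    | none => exact absurd (List.getLast?_eq_none_iff.mp hgl) hcne
    | some x => rfl
  by_cases hN0 : N = 0
  · exfalso
    rw [hN0] at hgrowD
    simp at hgrowD
  have hNpos : 0 < N := lt_of_le_of_ne hN (Ne.symm hN0)
  have hdsd : (Nat.digits 10 N.toNat).reverse.map (fun (n : Nat) => (n : Int))
      = cs.map pvVal := by rw [hcs]; exact pv_dsD_eq N hNpos
  have hnone : nextAllowed S s₀ (cs.map pvVal) = none := by
    have hiso := (pv_none_iff S s₀ M hM hmax cs).mpr (by rw [hMdef, hdsd] at hgrowD; exact hgrowD)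
    cases hno : nextAllowed S s₀ (cs.map pvVal) with
    | none => rfl
    | some t => rw [hno] at hiso; cases hiso
  have hne : pvAnsG S (pvChr s₀) cs ≠ [] := by
    intro he
    rcases pv_ansG_nonempty_of_not_allfail S (pvChr s₀) M hM cs he with h | ⟨hlast, hall⟩
    · exact hcne h
    · apply hnall
      rw [hMdef, hdsd]
      refine ⟨by rw [hlastmap]; exact hlast, ?_⟩
      intro d hd
      rw [← List.map_dropLast] at hd
      obtain ⟨c, hcm2, rfl⟩ := List.mem_map.mp hd
      exact hall c hcm2
  have hOK : ∀ d ∈ (((PySem.List.min? (S.filter (fun num => decide (0 < num))) (fun x => x)).getD 0)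
      :: List.replicate (cs.map pvVal).length s₀), 0 ≤ d ∧ d ≤ 9 := by
    intro d hd
    rcases List.mem_cons.mp hd with rfl | hd
    · exact hmstar
    · rw [List.eq_of_mem_replicate hd]; exact hs₀
  rw [hsolveA, if_neg hne, hsolveB, hnone]
  intro heq
  have hlists := congrArg String.toList heq
  rw [String.toList_ofList, pv_join_digits _ hOK] at hlists
  have hlenA : (pvAnsG S (pvChr s₀) cs).length ≤ cs.length := pv_ansG_length S (pvChr s₀) hSsub cs
  rw [hlists] at hlenA
  simp only [List.length_map, List.length_cons, List.length_replicate] at hlenA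
  omega
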